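-- pv_equiv track=rewrite | github.com/diamond-lizard/soma-upgrade-prerequisites | src/soma_upgrade_prerequisites/orphan_classify.py | _segments_match
-- ===== SOURCE A (Python) =====
-- def _segments_match(filename: str, package: str) -> bool:
--     """Check package appears as contiguous segment subsequence."""
--     stem = filename.removeprefix("soma-").removesuffix("-init.el")
--     file_segs = stem.split("-")
--     pkg_segs = package.split("-")
--     for i in range(len(file_segs) - len(pkg_segs) + 1):
--         if file_segs[i : i + len(pkg_segs)] == pkg_segs:
--             return True
--     return False
-- ===== SOURCE B (Python) =====
-- def _segments_match(filename: str, package: str) -> bool: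
--     """Check package appears as contiguous segment subsequence."""
--     stem = filename.removeprefix("soma-").removesuffix("-init.el")
--     return f"-{package}-" in f"-{stem}-"
-- ===== Notes on version B (the rewrite author's own statement) =====
-- stated objective: simpler
-- what changed: Replaces splitting into segment lists and scanning every window for list equality by a single delimited substring test: '-' + package + '-' in '-' + stem + '-' (the sentinel dashes force matches to align to segment boundaries).
import Mathlib
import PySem

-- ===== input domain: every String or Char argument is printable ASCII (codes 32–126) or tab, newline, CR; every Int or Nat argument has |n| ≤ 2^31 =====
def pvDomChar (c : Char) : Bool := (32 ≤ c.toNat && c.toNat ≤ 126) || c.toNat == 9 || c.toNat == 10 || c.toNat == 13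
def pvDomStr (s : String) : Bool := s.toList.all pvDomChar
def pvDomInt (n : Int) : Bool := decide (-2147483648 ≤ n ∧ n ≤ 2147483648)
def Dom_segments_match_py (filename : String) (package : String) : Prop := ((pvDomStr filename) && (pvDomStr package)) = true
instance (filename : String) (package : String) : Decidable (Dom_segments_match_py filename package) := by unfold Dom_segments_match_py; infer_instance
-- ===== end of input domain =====

-- B replaces A's explicit window scan over split segments by a single delimited
-- substring test `("-" + package + "-") in ("-" + stem + "-")` (objective: simpler).

-- shared stem extraction: str.removeprefix / str.removesuffix (not in PySem), ported by hand, exact: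
-- Python removes the prefix/suffix iff it is present (removesuffix("") is a no-op, as is dropping 0 chars).
def pvRemoveprefix (s : List Char) (p : List Char) : List Char :=
  if PySem.Chars.startswith s p then s.drop p.length else s

def pvRemovesuffix (s : List Char) (p : List Char) : List Char :=
  if PySem.Chars.endswith s p then s.take (s.length - p.length) else s

-- ===== PORT A =====
def segments_match_py (filename : String) (package : String) : Bool :=
  let stem := pvRemovesuffix (pvRemoveprefix filename.toList "soma-".toList) "-init.el".toList
  let fileSegs := PySem.Chars.splitOn stem ['-']
  let pkgSegs := PySem.Chars.splitOn package.toList ['-']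
  (PySem.List.pyRange 0 ((fileSegs.length : Int) - (pkgSegs.length : Int) + 1) 1).any
    (fun i => PySem.List.slice fileSegs (some i) (some (i + (pkgSegs.length : Int))) == pkgSegs)

-- ===== PORT B =====
def segments_match_py_alt (filename : String) (package : String) : Bool :=
  let stem := pvRemovesuffix (pvRemoveprefix filename.toList "soma-".toList) "-init.el".toList
  PySem.Chars.isIn ('-' :: package.toList ++ ['-']) ('-' :: stem ++ ['-'])

-- ===== PRECONDITION & SPEC =====
def Spec_segments_match_py (filename : String) (package : String) (out : Bool) : Prop := out = segments_match_py_alt filename package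
instance (filename : String) (package : String) (out : Bool) : Decidable (Spec_segments_match_py filename package out) := by unfold Spec_segments_match_py; infer_instance

-- ===== CLAIM (what is proved, stated in full; the proofs are below) =====
def Claim_equal_segments_match_py : Prop := ∀ (filename : String) (package : String), Dom_segments_match_py filename package → Spec_segments_match_py filename package (segments_match_py filename package)

-- ===== LEMMAS AND PROOFS =====

-- reference single-char '-' splitter, structural
def pvSplit : List Char → List (List Char)
  | [] => [[]]
  | c :: rest => if c = '-' then [] :: pvSplit rest else (pvSplit rest).modifyHead (c :: ·)

-- '-'-delimited encoding of a segment list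
def pvEnc (L : List (List Char)) : List Char := L.flatMap (fun s => '-' :: s) ++ ['-']

theorem pvSplit_ne_nil (l : List Char) : pvSplit l ≠ [] := by
  induction l with
  | nil => simp [pvSplit]
  | cons c rest ih =>
    simp only [pvSplit]
    split
    · simp
    · cases h : pvSplit rest with
      | nil => exact absurd h ih
      | cons a t => simp [List.modifyHead]

theorem pvSplit_flatMap (l : List Char) :
    (pvSplit l).flatMap (fun s => '-' :: s) = '-' :: l := by
  induction l with
  | nil => simp [pvSplit]
  | cons c rest ih =>
    simp only [pvSplit]
    split
    · subst_eqs; simp [ih]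
    · cases h : pvSplit rest with
      | nil => exact absurd h (pvSplit_ne_nil rest)
      | cons a t =>
        rw [h] at ih
        simp only [List.modifyHead, List.flatMap_cons] at ih ⊢
        cases ih
        simp

theorem pvSplit_dashFree (l : List Char) : ∀ seg ∈ pvSplit l, '-' ∉ seg := by
  induction l with
  | nil => simp [pvSplit]
  | cons c rest ih =>
    simp only [pvSplit]
    split
    · intro seg hseg
      rcases List.mem_cons.mp hseg with h | h
      · simp [h]
      · exact ih seg h
    · rename_i hc
      cases h : pvSplit rest with
      | nil => exact absurd h (pvSplit_ne_nil rest)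
      | cons a t =>
        intro seg hseg
        simp only [List.modifyHead] at hseg
        rcases List.mem_cons.mp hseg with h' | h'
        · subst h'
          intro hm
          rcases List.mem_cons.mp hm with h'' | h''
          · exact hc h''.symm
          · exact ih a (h ▸ List.mem_cons_self) h''
        · exact ih seg (h ▸ List.mem_cons_of_mem a h')

-- PySem.Chars.splitOn with a single-char separator is pvSplit
theorem splitOn_go_eq (fuel : Nat) (l cur : List Char) (acc : List (List Char))
    (h : l.length < fuel) :
    PySem.Chars.splitOn.go ['-'] fuel l cur acc
      = acc.reverse ++ (pvSplit l).modifyHead (cur.reverse ++ ·) := by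
  induction fuel generalizing l cur acc with
  | zero => omega
  | succ n ih =>
    cases l with
    | nil => simp [PySem.Chars.splitOn.go, pvSplit]
    | cons c rest =>
      simp only [PySem.Chars.splitOn.go]
      by_cases hc : c = '-'
      · have hp : List.isPrefixOf ['-'] (c :: rest) = true := by
          subst hc; simp [List.isPrefixOf]
        rw [if_pos hp]
        have hd : List.drop ['-'].length (c :: rest) = rest := rfl
        rw [hd, ih rest [] (cur.reverse :: acc) (by simp at h ⊢; omega)]
        subst hc
        simp only [pvSplit, if_true]
        cases hs : pvSplit rest with
        | nil => exact absurd hs (pvSplit_ne_nil rest)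
        | cons a t => simp
      · rw [if_neg (by simp [List.isPrefixOf]; exact fun h' => hc h'.symm)]
        rw [ih rest (c :: cur) acc (by simp at h ⊢; omega)]
        simp only [pvSplit, if_neg hc]
        cases hs : pvSplit rest with
        | nil => exact absurd hs (pvSplit_ne_nil rest)
        | cons a t => simp

theorem splitOn_eq_pvSplit (l : List Char) :
    PySem.Chars.splitOn l ['-'] = pvSplit l := by
  rw [show PySem.Chars.splitOn l ['-'] = PySem.Chars.splitOn.go ['-'] (l.length + 1) l [] [] from rfl]
  rw [splitOn_go_eq (l.length + 1) l [] [] (by omega)]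
  cases hs : pvSplit l with
  | nil => exact absurd hs (pvSplit_ne_nil l)
  | cons a t => simp

-- pvEnc of a cons / of any list starts with '-'
theorem pvEnc_eq_cons (L : List (List Char)) : ∃ r, pvEnc L = '-' :: r := by
  cases L with
  | nil => exact ⟨[], rfl⟩
  | cons a t => exact ⟨a ++ pvEnc t, by simp [pvEnc]⟩

theorem pvEnc_cons (a : List Char) (L : List (List Char)) :
    pvEnc (a :: L) = '-' :: (a ++ pvEnc L) := by simp [pvEnc]

theorem pvEnc_length_pos (L : List (List Char)) : 0 < (pvEnc L).length := by
  obtain ⟨r, hr⟩ := pvEnc_eq_cons L; simp [hr]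

-- dash-boundary alignment: matching prefixes up to the first '-'
theorem pvAlign (p : List Char) : ∀ (f x y : List Char), '-' ∉ p → '-' ∉ f →
    (p ++ '-' :: x) <+: (f ++ '-' :: y) → p = f ∧ x <+: y := by
  induction p with
  | nil =>
    intro f x y _ hf hpre
    cases f with
    | nil => simpa using hpre
    | cons a f' =>
      simp only [List.nil_append, List.cons_append, List.cons_prefix_cons] at hpre
      exact absurd hpre.1 (by intro h; exact hf (h ▸ List.mem_cons_self))
  | cons c p' ih =>
    intro f x y hp hf hpre
    cases f with
    | nil =>
      simp only [List.cons_append, List.nil_append, List.cons_prefix_cons] at hpre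
      exact absurd hpre.1 (fun h => hp (h ▸ List.mem_cons_self))
    | cons a f' =>
      simp only [List.cons_append, List.cons_prefix_cons] at hpre
      obtain ⟨rfl, hrest⟩ := hpre
      obtain ⟨h1, h2⟩ := ih f' x y (fun h => hp (List.mem_cons_of_mem _ h))
        (fun h => hf (List.mem_cons_of_mem _ h)) hrest
      exact ⟨by rw [h1], h2⟩

-- prefix direction of the encoding lemma
theorem pvEnc_prefix (P : List (List Char)) : ∀ (F : List (List Char)),
    (∀ s ∈ P, '-' ∉ s) → (∀ s ∈ F, '-' ∉ s) →
    pvEnc P <+: pvEnc F → P <+: F := by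
  induction P with
  | nil => intro F _ _ _; exact F.nil_prefix
  | cons p P' ih =>
    intro F hP hF hpre
    cases F with
    | nil =>
      exfalso
      have hl := hpre.length_le
      rw [pvEnc_cons] at hl
      have := pvEnc_length_pos P'
      simp [pvEnc] at hl
    | cons f F' =>
      obtain ⟨rp, hrp⟩ := pvEnc_eq_cons P'
      obtain ⟨rf, hrf⟩ := pvEnc_eq_cons F'
      have hpre' : (p ++ '-' :: rp) <+: (f ++ '-' :: rf) := by
        have h0 : ('-' :: (p ++ pvEnc P')) <+: ('-' :: (f ++ pvEnc F')) := by
          rw [← pvEnc_cons, ← pvEnc_cons]; exact hpre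
        rw [hrp, hrf] at h0
        exact (List.cons_prefix_cons.mp h0).2
      obtain ⟨rfl, hxy⟩ := pvAlign p f rp rf (hP p List.mem_cons_self) (hF f List.mem_cons_self) hpre'
      have hPF : P' <+: F' := by
        apply ih F' (fun s hs => hP s (List.mem_cons_of_mem _ hs))
          (fun s hs => hF s (List.mem_cons_of_mem _ hs))
        rw [hrp, hrf]
        exact List.cons_prefix_cons.mpr ⟨rfl, hxy⟩
      exact List.cons_prefix_cons.mpr ⟨rfl, hPF⟩

-- skipping a dash-free block: an infix starting with '-' lives in the tail
theorem pvSkip (f : List Char) : ∀ (s t : List Char) (r : List Char), s = '-' :: r → '-' ∉ f →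
    s <:+: (f ++ t) → s <:+: t := by
  induction f with
  | nil => intro s t r _ _ h; simpa using h
  | cons a f' ih =>
    intro s t r hs hf hinf
    rcases List.infix_cons_iff.mp (by simpa using hinf) with h | h
    · exfalso
      subst hs
      simp only [List.cons_prefix_cons] at h
      exact hf (h.1 ▸ List.mem_cons_self)
    · exact ih s t r hs (fun h' => hf (List.mem_cons_of_mem _ h')) h

-- main encoding lemma
theorem pvEnc_infix_iff (P F : List (List Char)) (hPne : P ≠ [])
    (hP : ∀ s ∈ P, '-' ∉ s) (hF : ∀ s ∈ F, '-' ∉ s) :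
    pvEnc P <:+: pvEnc F ↔ P <:+: F := by
  constructor
  · intro h
    induction F with
    | nil =>
      exfalso
      cases P with
      | nil => exact hPne rfl
      | cons p P' =>
        have hlen := h.length_le
        rw [pvEnc_cons] at hlen
        have := pvEnc_length_pos P'
        simp [pvEnc] at hlen
    | cons f F' ih =>
      rw [pvEnc_cons] at h
      rcases List.infix_cons_iff.mp h with hpre | hinf
      · have hpre' : pvEnc P <+: pvEnc (f :: F') := by rw [pvEnc_cons]; exact hpre
        exact (pvEnc_prefix P (f :: F') hP hF hpre').isInfix
      · obtain ⟨r, hr⟩ := pvEnc_eq_cons P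
        have h' : pvEnc P <:+: pvEnc F' :=
          pvSkip f (pvEnc P) (pvEnc F') r hr (hF f List.mem_cons_self) hinf
        exact List.infix_cons_iff.mpr
          (Or.inr (ih (fun s hs => hF s (List.mem_cons_of_mem _ hs)) h'))
  · rintro ⟨u, v, rfl⟩
    obtain ⟨r, hr⟩ : ∃ r, pvEnc v = '-' :: r := pvEnc_eq_cons v
    refine ⟨u.flatMap (fun s => '-' :: s), r, ?_⟩
    simp only [pvEnc, List.flatMap_append, List.append_assoc] at *
    rw [show v.flatMap (fun s => '-' :: s) ++ ['-'] = '-' :: r from hr]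
    simp

-- A's loop is the segment-level infix test
theorem pvLoop_iff (F P : List (List Char)) :
    ((PySem.List.pyRange 0 ((F.length : Int) - (P.length : Int) + 1) 1).any
      (fun i => PySem.List.slice F (some i) (some (i + (P.length : Int))) == P)) = true
    ↔ P <:+: F := by
  rw [List.any_eq_true]
  constructor
  · rintro ⟨i, hi, hslice⟩
    obtain ⟨h0, -, -⟩ := (PySem.List.mem_pyRange_iff_of_pos (by norm_num) i).mp hi
    obtain ⟨j, rfl⟩ : ∃ j : Nat, i = (j : Int) := ⟨i.toNat, (Int.toNat_of_nonneg h0).symm⟩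
    rw [PySem.List.slice_natCast_add] at hslice
    have heq : (F.drop j).take P.length = P := by simpa using hslice
    calc P = (F.drop j).take P.length := heq.symm
      _ <:+: F.drop j := (List.take_prefix _ _).isInfix
      _ <:+: F := (List.drop_suffix j F).isInfix
  · rintro ⟨u, v, rfl⟩
    refine ⟨(u.length : Int), ?_, ?_⟩
    · refine (PySem.List.mem_pyRange_iff_of_pos (by norm_num) _).mpr ⟨by omega, ?_, one_dvd _⟩
      simp only [List.length_append]
      push_cast
      omega
    · rw [PySem.List.slice_natCast_add]
      simp [List.take_left']

-- ===== VERDICT (by name: the statement is the Claim_ definition above) =====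
theorem segments_match_py_spec : Claim_equal_segments_match_py := by
  intro filename package _
  unfold Spec_segments_match_py segments_match_py segments_match_py_alt
  set stem := pvRemovesuffix (pvRemoveprefix filename.toList "soma-".toList) "-init.el".toList with hstem
  simp only [splitOn_eq_pvSplit]
  rw [Bool.eq_iff_iff, pvLoop_iff, PySem.Chars.isIn_iff_infix]
  have h1 : '-' :: package.toList ++ ['-'] = pvEnc (pvSplit package.toList) := by
    simp [pvEnc, pvSplit_flatMap]
  have h2 : '-' :: stem ++ ['-'] = pvEnc (pvSplit stem) := by
    simp [pvEnc, pvSplit_flatMap]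
  rw [h1, h2, pvEnc_infix_iff _ _ (pvSplit_ne_nil _) (pvSplit_dashFree _) (pvSplit_dashFree _)]
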